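-- pv_equiv track=rewrite | github.com/ministryofjustice/hmpps-component-dependencies | component_dependencies_discovery.py | calculate_dependents
-- ===== SOURCE A (Python) =====
-- from collections import defaultdict
--
-- def calculate_dependents(components):
--     reverse_graph = defaultdict(list)
--     for component, deps in components.items():
--         for dep in deps:
--             reverse_graph[dep].append(component)
--
--     def dfs(component, visited):
--         if component in visited:
--             return set()
--         visited.add(component)
--         result = set(reverse_graph[component])
--         for dep in reverse_graph[component]:
--             result.update(dfs(dep, visited))
--         return result
--
--     dependents = {}
--     for component in components:
--         dependents[component] = len(dfs(component, set()))
--     return dependents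
-- ===== SOURCE B (Python) =====
-- def calculate_dependents(components):
--     # Iterative worklist DFS per component over an explicitly built reverse adjacency map.
--     rev = {}
--     for component, deps in components.items():
--         for dep in deps:
--             rev.setdefault(dep, []).append(component)
--     out = {}
--     for c in components:
--         seen = set()
--         stack = list(rev.get(c, []))
--         while stack:
--             n = stack.pop()
--             if n not in seen:
--                 seen.add(n)
--                 stack.extend(rev.get(n, []))
--         out[c] = len(seen)
--     return out
-- ===== Notes on version B (the rewrite author's own statement) =====
-- stated objective: alternative
-- what changed: Per-source recursive DFS that allocates and unions a 'result' set at every visited node is replaced by an explicit-stack worklist that marks each reachable node once in a 'seen' set, so no intermediate sets are built or merged.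
import Mathlib
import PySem

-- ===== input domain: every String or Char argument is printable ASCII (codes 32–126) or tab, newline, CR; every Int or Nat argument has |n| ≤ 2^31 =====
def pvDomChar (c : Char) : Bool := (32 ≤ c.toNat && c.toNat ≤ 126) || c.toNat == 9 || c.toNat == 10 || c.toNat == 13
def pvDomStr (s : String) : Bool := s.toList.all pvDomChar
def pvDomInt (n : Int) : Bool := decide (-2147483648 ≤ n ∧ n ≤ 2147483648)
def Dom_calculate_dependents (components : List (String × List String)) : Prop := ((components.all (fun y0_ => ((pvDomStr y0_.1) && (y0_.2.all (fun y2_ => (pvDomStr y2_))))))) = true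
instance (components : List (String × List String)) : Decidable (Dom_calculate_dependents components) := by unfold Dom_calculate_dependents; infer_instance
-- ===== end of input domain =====

-- B replaces A's per-source recursive DFS (which builds and unions a result set at every
-- visited node) by an explicit-stack worklist marking each reachable node once, so no
-- intermediate sets are built or merged. The dict parameter is interpreted with Python dict
-- semantics (PySem.Dict.ofList: last value wins for a duplicate key, first position kept).

-- ===== PORT A =====
-- reverse_graph = defaultdict(list); reverse_graph[dep].append(component)
-- (dfs's read reverse_graph[component] on the defaultdict inserts [] for a missing key; that
-- mutation is unobservable through getD _ [] and is not modelled)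
def pvRevGraphA (items : List (String × List String)) : PySem.Dict String (List String) :=
  items.foldl
    (fun rg p => p.2.foldl (fun rg dep => rg.modify dep [] (fun l => l ++ [p.1])) rg)
    PySem.Dict.empty

-- def dfs(component, visited) with the shared mutable 'visited' threaded through;
-- fuel only bounds the recursion depth (|keys|+1 always suffices, proved below)
mutual
def pvDfsA (rg : PySem.Dict String (List String)) :
    Nat → String → PySem.Set String → PySem.Set String × PySem.Set String
  | 0, _, visited => (PySem.Set.empty, visited)
  | fuel+1, component, visited =>
    if component ∈ visited then (PySem.Set.empty, visited)
    else
      let visited1 := PySem.Set.add visited component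
      let nb := rg.getD component []
      pvDfsForA rg fuel nb (PySem.Set.ofList nb) visited1
  termination_by fuel _ _ => (fuel, 0)
-- the 'for dep in reverse_graph[component]: result.update(dfs(dep, visited))' loop
def pvDfsForA (rg : PySem.Dict String (List String)) :
    Nat → List String → PySem.Set String → PySem.Set String → PySem.Set String × PySem.Set String
  | _, [], result, visited => (result, visited)
  | fuel, dep :: deps, result, visited =>
    let rv := pvDfsA rg fuel dep visited
    pvDfsForA rg fuel deps (PySem.Set.update result rv.1) rv.2
  termination_by fuel ds _ _ => (fuel, ds.length + 1)
end

def calculate_dependents (components : List (String × List String)) : List (String × Int) :=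
  let comps := PySem.Dict.ofList components
  let rg := pvRevGraphA comps.items
  let fuel := comps.items.length + 1
  (comps.items.foldl
    (fun d p => d.insert p.1 ((pvDfsA rg fuel p.1 PySem.Set.empty).1.length : Int))
    PySem.Dict.empty).items

-- ===== PORT B =====
-- rev.setdefault(dep, []).append(component)
def pvRevGraphB (items : List (String × List String)) : PySem.Dict String (List String) :=
  items.foldl
    (fun rg p => p.2.foldl (fun rg dep => rg.insert dep (rg.getD dep [] ++ [p.1])) rg)
    PySem.Dict.empty

-- the while-loop; the stack is kept top-first (head = Python's stack[-1]), so
-- stack.pop() is a head match and stack.extend(xs) pushes xs.reverse in front;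
-- fuel bounds the number of iterations (it always suffices, proved below)
def pvTraverseB (rg : PySem.Dict String (List String)) :
    Nat → List String → PySem.Set String → PySem.Set String
  | 0, _, seen => seen
  | _+1, [], seen => seen
  | fuel+1, n :: stack, seen =>
    if n ∈ seen then pvTraverseB rg fuel stack seen
    else pvTraverseB rg fuel ((rg.getD n []).reverse ++ stack) (PySem.Set.add seen n)

def calculate_dependents_alt (components : List (String × List String)) : List (String × Int) :=
  let comps := PySem.Dict.ofList components
  let rg := pvRevGraphB comps.items
  let total := (comps.keys.map (fun k => (rg.getD k []).length)).sum
  (comps.items.foldl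
    (fun out p =>
      let stack := (rg.getD p.1 []).reverse
      out.insert p.1 ((pvTraverseB rg (stack.length + total + 1) stack PySem.Set.empty).length : Int))
    PySem.Dict.empty).items

-- ===== PRECONDITION & SPEC =====
def Spec_calculate_dependents (components : List (String × List String)) (out : List (String × Int)) : Prop := out = calculate_dependents_alt components
instance (components : List (String × List String)) (out : List (String × Int)) : Decidable (Spec_calculate_dependents components out) := by unfold Spec_calculate_dependents; infer_instance

-- ===== CLAIM (what is proved, stated in full; the proofs are below) =====
def Claim_equal_calculate_dependents : Prop := ∀ (components : List (String × List String)), Dom_calculate_dependents components → Spec_calculate_dependents components (calculate_dependents components)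

-- ===== LEMMAS AND PROOFS =====

-- edge relation of the reverse graph: a -> b when b is in rg[a]
def pvE (rg : PySem.Dict String (List String)) (a b : String) : Prop := b ∈ rg.getD a []

-- filter-length monotonicity / strict decrease (used for the fuel bounds)
theorem pv_filter_len_le (p q : String → Bool) (h : ∀ x, q x = true → p x = true) :
    ∀ U : List String, (U.filter q).length ≤ (U.filter p).length := by
  intro U
  induction U with
  | nil => simp
  | cons a U ih =>
    by_cases hq : q a = true
    · rw [List.filter_cons_of_pos hq, List.filter_cons_of_pos (h a hq)]
      simpa using ih
    · rw [List.filter_cons_of_neg (by simpa using hq)]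
      by_cases hp : p a = true
      · rw [List.filter_cons_of_pos hp]
        exact Nat.le_succ_of_le ih
      · rw [List.filter_cons_of_neg (by simpa using hp)]
        exact ih

theorem pv_filter_len_lt (p q : String → Bool) (h : ∀ x, q x = true → p x = true)
    (c : String) (hpc : p c = true) (hqc : ¬ q c = true) :
    ∀ U : List String, c ∈ U → (U.filter q).length < (U.filter p).length := by
  intro U
  induction U with
  | nil => simp
  | cons a U ih =>
    intro hc
    by_cases hac : a = c
    · subst hac
      rw [List.filter_cons_of_pos hpc, List.filter_cons_of_neg (by simpa using hqc)]
      exact Nat.lt_succ_of_le (pv_filter_len_le p q h U)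
    · have hc' : c ∈ U := by
        rcases List.mem_cons.mp hc with h1 | h1
        · exact absurd h1.symm hac
        · exact h1
      by_cases hq : q a = true
      · rw [List.filter_cons_of_pos hq, List.filter_cons_of_pos (h a hq)]
        simpa using ih hc'
      · rw [List.filter_cons_of_neg (by simpa using hq)]
        by_cases hp : p a = true
        · rw [List.filter_cons_of_pos hp]
          exact Nat.lt_succ_of_lt (ih hc')
        · rw [List.filter_cons_of_neg (by simpa using hp)]
          exact ih hc'

-- the inner 'for dep in deps' loop of the reverse-graph construction keeps values in P
theorem pvRevInner (P : String → Prop) (comp : String) (hc : P comp) :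
    ∀ (deps : List String) (rg : PySem.Dict String (List String)),
      (∀ x d, d ∈ rg.getD x [] → P d) →
      ∀ x d, d ∈ (deps.foldl (fun rg dep => rg.modify dep [] (fun l => l ++ [comp])) rg).getD x [] → P d := by
  intro deps
  induction deps with
  | nil => intro rg h; simpa using h
  | cons dep deps ih =>
    intro rg h x d hd
    refine ih _ ?_ x d hd
    intro y e he
    rw [PySem.Dict.getD_modify] at he
    by_cases hy : y = dep
    · simp only [hy, if_true] at he
      rcases List.mem_append.mp he with h1 | h1
      · exact h dep e h1
      · simp at h1; subst h1; exact hc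
    · rw [if_neg hy] at he; exact h y e he

theorem pvRevGraphA_values (items : List (String × List String)) (P : String → Prop)
    (hP : ∀ p ∈ items, P p.1) :
    ∀ x d, d ∈ (pvRevGraphA items).getD x [] → P d := by
  unfold pvRevGraphA
  have main : ∀ (its : List (String × List String)) (rg : PySem.Dict String (List String)),
      (∀ p ∈ its, P p.1) → (∀ x d, d ∈ rg.getD x [] → P d) →
      ∀ x d, d ∈ (its.foldl (fun rg p => p.2.foldl (fun rg dep => rg.modify dep [] (fun l => l ++ [p.1])) rg) rg).getD x [] → P d := by
    intro its
    induction its with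
    | nil => intro rg _ h; simpa using h
    | cons p its ih =>
      intro rg hPs h x d hd
      refine ih _ (fun q hq => hPs q (List.mem_cons_of_mem _ hq)) ?_ x d hd
      exact pvRevInner P p.1 (hPs p (List.mem_cons_self)) p.2 rg h
  refine main items PySem.Dict.empty hP ?_
  intro x d hd
  rw [PySem.Dict.getD_empty] at hd
  simp at hd

-- the neighbour loop of A's dfs, given the one-node invariant at the same fuel
theorem pvDfsForA_spec (rg : PySem.Dict String (List String)) (U : List String)
    (fuel : Nat)
    (hS : ∀ (c : String) (V : PySem.Set String), c ∈ U → V.Nodup →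
      ((U.filter (fun x => decide (x ∉ V))).length < fuel) →
      (∀ x ∈ V, x ∈ (pvDfsA rg fuel c V).2) ∧
      (pvDfsA rg fuel c V).2.Nodup ∧
      (pvDfsA rg fuel c V).1.Nodup ∧
      (∀ x, x ∈ (pvDfsA rg fuel c V).1 ↔ ∃ v, v ∈ (pvDfsA rg fuel c V).2 ∧ v ∉ V ∧ x ∈ rg.getD v []) ∧
      (∀ v ∈ (pvDfsA rg fuel c V).2, v ∈ V ∨ Relation.ReflTransGen (pvE rg) c v) ∧
      (∀ v, v ∈ (pvDfsA rg fuel c V).2 → v ∉ V → ∀ d ∈ rg.getD v [], d ∈ (pvDfsA rg fuel c V).2) ∧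
      c ∈ (pvDfsA rg fuel c V).2) :
    ∀ (ds : List String) (R V : PySem.Set String), (∀ d ∈ ds, d ∈ U) → V.Nodup → R.Nodup →
      ((U.filter (fun x => decide (x ∉ V))).length < fuel) →
      (∀ x ∈ V, x ∈ (pvDfsForA rg fuel ds R V).2) ∧
      (pvDfsForA rg fuel ds R V).2.Nodup ∧
      (pvDfsForA rg fuel ds R V).1.Nodup ∧
      (∀ x, x ∈ (pvDfsForA rg fuel ds R V).1 ↔ x ∈ R ∨ ∃ v, v ∈ (pvDfsForA rg fuel ds R V).2 ∧ v ∉ V ∧ x ∈ rg.getD v []) ∧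
      (∀ v ∈ (pvDfsForA rg fuel ds R V).2, v ∈ V ∨ ∃ d ∈ ds, Relation.ReflTransGen (pvE rg) d v) ∧
      (∀ v, v ∈ (pvDfsForA rg fuel ds R V).2 → v ∉ V → ∀ e ∈ rg.getD v [], e ∈ (pvDfsForA rg fuel ds R V).2) ∧
      (∀ d ∈ ds, d ∈ (pvDfsForA rg fuel ds R V).2) := by
  intro ds
  induction ds with
  | nil =>
    intro R V _ hV hR hlen
    simp only [pvDfsForA]
    refine ⟨fun x hx => hx, hV, hR, ?_, fun v hv => Or.inl hv, ?_, by simp⟩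
    · intro x
      constructor
      · intro hx; exact Or.inl hx
      · rintro (hx | ⟨v, hv, hnv, _⟩)
        · exact hx
        · exact absurd hv hnv
    · intro v hv hnv _ _; exact absurd hv hnv
  | cons d ds ih =>
    intro R V hds hV hR hlen
    have hdU : d ∈ U := hds d (List.mem_cons_self)
    obtain ⟨s1, s2, s3, s4, s5, s6, s7⟩ := hS d V hdU hV hlen
    set rv := pvDfsA rg fuel d V with hrv
    have hsub : ∀ x ∈ V, x ∈ rv.2 := s1
    have hlen2 : ((U.filter (fun x => decide (x ∉ rv.2))).length < fuel) := by
      have hle := pv_filter_len_le (fun x => decide (x ∉ V)) (fun x => decide (x ∉ rv.2))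
        (by intro x hx; simp at hx ⊢; intro hxV; exact hx (hsub x hxV)) U
      omega
    obtain ⟨t1, t2, t3, t4, t5, t6, t7⟩ := ih (PySem.Set.update R rv.1) rv.2
      (fun e he => hds e (List.mem_cons_of_mem _ he)) s2 (PySem.Set.nodup_update _ _ hR) hlen2
    simp only [pvDfsForA]
    rw [← hrv]
    refine ⟨fun x hx => t1 x (hsub x hx), t2, t3, ?_, ?_, ?_, ?_⟩
    · -- membership of the result set
      intro x
      rw [t4 x]
      constructor
      · rintro (hx | ⟨v, hv, hnv, hnb⟩)
        · rcases (PySem.Set.mem_update R rv.1 x).mp hx with hx | hx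
          · exact Or.inl hx
          · rcases (s4 x).mp hx with ⟨v, hv, hnv, hnb⟩
            exact Or.inr ⟨v, t1 v hv, hnv, hnb⟩
        · exact Or.inr ⟨v, hv, fun hvV => hnv (hsub v hvV), hnb⟩
      · rintro (hx | ⟨v, hv, hnv, hnb⟩)
        · exact Or.inl ((PySem.Set.mem_update R rv.1 x).mpr (Or.inl hx))
        · by_cases hvr : v ∈ rv.2
          · exact Or.inl ((PySem.Set.mem_update R rv.1 x).mpr
              (Or.inr ((s4 x).mpr ⟨v, hvr, hnv, hnb⟩)))
          · exact Or.inr ⟨v, hv, hvr, hnb⟩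
    · -- reachability of newly visited nodes
      intro v hv
      rcases t5 v hv with hv2 | ⟨e, he, hre⟩
      · rcases s5 v hv2 with hvV | hr
        · exact Or.inl hvV
        · exact Or.inr ⟨d, List.mem_cons_self, hr⟩
      · exact Or.inr ⟨e, List.mem_cons_of_mem _ he, hre⟩
    · -- closure of newly visited nodes
      intro v hv hnv e he
      by_cases hvr : v ∈ rv.2
      · exact t1 e (s6 v hvr hnv e he)
      · exact t6 v hv hvr e he
    · -- all loop elements end up visited
      intro e he
      rcases List.mem_cons.mp he with rfl | he
      · exact t1 e s7
      · exact t7 e he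

theorem pvDfsA_spec (rg : PySem.Dict String (List String)) (U : List String)
    (hg : ∀ x, ∀ d ∈ rg.getD x [], d ∈ U) :
    ∀ fuel (c : String) (V : PySem.Set String), c ∈ U → V.Nodup →
      ((U.filter (fun x => decide (x ∉ V))).length < fuel) →
      (∀ x ∈ V, x ∈ (pvDfsA rg fuel c V).2) ∧
      (pvDfsA rg fuel c V).2.Nodup ∧
      (pvDfsA rg fuel c V).1.Nodup ∧
      (∀ x, x ∈ (pvDfsA rg fuel c V).1 ↔ ∃ v, v ∈ (pvDfsA rg fuel c V).2 ∧ v ∉ V ∧ x ∈ rg.getD v []) ∧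
      (∀ v ∈ (pvDfsA rg fuel c V).2, v ∈ V ∨ Relation.ReflTransGen (pvE rg) c v) ∧
      (∀ v, v ∈ (pvDfsA rg fuel c V).2 → v ∉ V → ∀ d ∈ rg.getD v [], d ∈ (pvDfsA rg fuel c V).2) ∧
      c ∈ (pvDfsA rg fuel c V).2 := by
  intro fuel
  induction fuel with
  | zero => intro c V _ _ hlen; omega
  | succ fuel ih =>
    intro c V hc hV hlen
    by_cases hcV : c ∈ V
    · simp only [pvDfsA, if_pos hcV]
      refine ⟨fun x hx => hx, hV, List.nodup_nil, ?_, fun v hv => Or.inl hv, ?_, hcV⟩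
      · intro x
        simp only [PySem.Set.empty]
        constructor
        · intro hx; simp at hx
        · rintro ⟨v, hv, hnv, _⟩; exact absurd hv hnv
      · intro v hv hnv; exact absurd hv hnv
    · have hadd : PySem.Set.add V c = V ++ [c] := PySem.Set.add_of_not_mem hcV
      have hV1 : (PySem.Set.add V c).Nodup := PySem.Set.nodup_add V c hV
      have hsubV1 : ∀ x ∈ V, x ∈ PySem.Set.add V c := by
        intro x hx; exact (PySem.Set.mem_add V c x).mpr (Or.inl hx)
      have hcV1 : c ∈ PySem.Set.add V c := (PySem.Set.mem_add V c c).mpr (Or.inr rfl)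
      have hlen1 : ((U.filter (fun x => decide (x ∉ PySem.Set.add V c))).length < fuel) := by
        have hlt := pv_filter_len_lt (fun x => decide (x ∉ V)) (fun x => decide (x ∉ PySem.Set.add V c))
          (by
            intro x hx
            simp only [decide_eq_true_eq] at hx ⊢
            exact fun hxV => hx (hsubV1 x hxV))
          c (by simpa using hcV) (by simp [hcV1]) U hc
        omega
      obtain ⟨t1, t2, t3, t4, t5, t6, t7⟩ := pvDfsForA_spec rg U fuel (ih) (rg.getD c [])
        (PySem.Set.ofList (rg.getD c [])) (PySem.Set.add V c)
        (fun e he => hg c e he) hV1 (PySem.Set.nodup_ofList _) hlen1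
      simp only [pvDfsA, if_neg hcV]
      refine ⟨fun x hx => t1 x (hsubV1 x hx), t2, t3, ?_, ?_, ?_, t1 c hcV1⟩
      · intro x
        rw [t4 x]
        constructor
        · rintro (hx | ⟨v, hv, hnv, hnb⟩)
          · refine ⟨c, t1 c hcV1, hcV, ?_⟩
            simpa [PySem.Set.mem_ofList] using hx
          · refine ⟨v, hv, fun hvV => hnv (hsubV1 v hvV), hnb⟩
        · rintro ⟨v, hv, hnv, hnb⟩
          by_cases hvc : v = c
          · subst hvc
            exact Or.inl ((PySem.Set.mem_ofList _ x).mpr hnb)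
          · refine Or.inr ⟨v, hv, ?_, hnb⟩
            intro hv1
            rcases (PySem.Set.mem_add V c v).mp hv1 with h1 | h1
            · exact hnv h1
            · exact hvc h1
      · intro v hv
        rcases t5 v hv with hv1 | ⟨d, hd, hrd⟩
        · rcases (PySem.Set.mem_add V c v).mp hv1 with h1 | h1
          · exact Or.inl h1
          · subst h1; exact Or.inr Relation.ReflTransGen.refl
        · exact Or.inr (Relation.ReflTransGen.head (show pvE rg c d from hd) hrd)
      · intro v hv hnv d hd
        by_cases hvc : v = c
        · subst hvc
          exact t7 d hd
        · refine t6 v hv ?_ d hd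
          intro hv1
          rcases (PySem.Set.mem_add V c v).mp hv1 with h1 | h1
          · exact hnv h1
          · exact hvc h1

-- a set containing rg[c] and closed under rg-edges contains everything c reaches in ≥ 1 step
theorem pv_closed (rg : PySem.Dict String (List String)) (S : List String) (c : String)
    (hroot : ∀ d ∈ rg.getD c [], d ∈ S)
    (hclosed : ∀ v ∈ S, ∀ d ∈ rg.getD v [], d ∈ S) :
    ∀ x, Relation.TransGen (pvE rg) c x → x ∈ S := by
  intro x hx
  induction hx with
  | single h => exact hroot _ h
  | tail h1 h2 ih => exact hclosed _ ih _ h2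

-- A's dfs from an empty visited set returns exactly the nodes reachable by ≥ 1 edge
theorem pvDfsA_root (rg : PySem.Dict String (List String)) (U : List String)
    (hg : ∀ x, ∀ d ∈ rg.getD x [], d ∈ U) (c : String) (hc : c ∈ U)
    (fuel : Nat) (hfuel : U.length < fuel) :
    (pvDfsA rg fuel c PySem.Set.empty).1.Nodup ∧
    (∀ x, x ∈ (pvDfsA rg fuel c PySem.Set.empty).1 ↔ Relation.TransGen (pvE rg) c x) := by
  have hlen : ((U.filter (fun x => decide (x ∉ (PySem.Set.empty : PySem.Set String)))).length < fuel) := by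
    have : U.filter (fun x => decide (x ∉ (PySem.Set.empty : PySem.Set String))) = U := by
      apply List.filter_eq_self.mpr
      intro x _
      simp [PySem.Set.empty]
    rw [this]; exact hfuel
  obtain ⟨t1, t2, t3, t4, t5, t6, t7⟩ :=
    pvDfsA_spec rg U hg fuel c PySem.Set.empty hc List.nodup_nil hlen
  refine ⟨t3, ?_⟩
  have hnotmem : ∀ v : String, v ∉ (PySem.Set.empty : PySem.Set String) := by
    intro v; simp [PySem.Set.empty]
  have hclosed : ∀ v ∈ (pvDfsA rg fuel c PySem.Set.empty).2, ∀ d ∈ rg.getD v [],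
      d ∈ (pvDfsA rg fuel c PySem.Set.empty).2 := by
    intro v hv d hd; exact t6 v hv (hnotmem v) d hd
  have hroot : ∀ d ∈ rg.getD c [], d ∈ (pvDfsA rg fuel c PySem.Set.empty).2 := by
    intro d hd; exact hclosed c t7 d hd
  intro x
  rw [t4 x]
  constructor
  · rintro ⟨v, hv, _, hnb⟩
    rcases t5 v hv with h1 | h1
    · exact absurd h1 (hnotmem v)
    · exact Relation.TransGen.tail' h1 hnb
  · intro hx
    rcases Relation.TransGen.tail'_iff.mp hx with ⟨b, hrb, hb⟩
    rcases Relation.reflTransGen_iff_eq_or_transGen.mp hrb with rfl | htb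
    · exact ⟨b, t7, hnotmem b, hb⟩
    · exact ⟨b, pv_closed rg _ c hroot hclosed b htb, hnotmem b, hb⟩

-- splitting one unseen element out of the filtered sum (for B's fuel bound)
theorem pv_sum_filter (f : String → Nat) (n : String) (seen : List String) (hn : n ∉ seen) :
    ∀ U : List String, U.Nodup → n ∈ U →
      ((U.filter (fun x => decide (x ∉ seen))).map f).sum
        = f n + ((U.filter (fun x => decide (x ∉ seen ++ [n]))).map f).sum := by
  intro U
  induction U with
  | nil => simp
  | cons a U ih =>
    intro hnd hmem
    have ha : a ∉ U := (List.nodup_cons.mp hnd).1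
    have hU : U.Nodup := (List.nodup_cons.mp hnd).2
    by_cases han : a = n
    · subst han
      rw [List.filter_cons_of_pos (by simpa using hn),
          List.filter_cons_of_neg (by simp)]
      have hfilt : U.filter (fun x => decide (x ∉ seen ++ [a])) = U.filter (fun x => decide (x ∉ seen)) := by
        apply List.filter_congr
        intro x hx
        have hxa : x ≠ a := fun h => ha (h ▸ hx)
        simp [hxa]
      rw [hfilt]
      simp
    · have hmem' : n ∈ U := by
        rcases List.mem_cons.mp hmem with h1 | h1
        · exact absurd h1.symm han
        · exact h1
      have heq : (decide (a ∉ seen ++ [n])) = (decide (a ∉ seen)) := by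
        simp [han]
      by_cases hpa : a ∈ seen
      · rw [List.filter_cons_of_neg (by simpa using hpa),
            List.filter_cons_of_neg (by simp [hpa])]
        exact ih hU hmem'
      · rw [List.filter_cons_of_pos (by simpa using hpa),
            List.filter_cons_of_pos (by simp [hpa, han])]
        simp only [List.map_cons, List.sum_cons]
        rw [ih hU hmem']
        omega

-- B's worklist loop: invariant and final characterisation
theorem pvTraverseB_spec (rg : PySem.Dict String (List String)) (U : List String)
    (hg : ∀ x, ∀ d ∈ rg.getD x [], d ∈ U) (hU : U.Nodup) (c : String) :
    ∀ fuel (stack : List String) (seen : PySem.Set String),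
      (∀ n ∈ stack, Relation.TransGen (pvE rg) c n) →
      (∀ n ∈ stack, n ∈ U) →
      (∀ v ∈ seen, Relation.TransGen (pvE rg) c v) →
      (∀ v ∈ seen, ∀ d ∈ rg.getD v [], d ∈ seen ∨ d ∈ stack) →
      (∀ d ∈ rg.getD c [], d ∈ seen ∨ d ∈ stack) →
      seen.Nodup →
      stack.length + (((U.filter (fun x => decide (x ∉ seen))).map (fun k => (rg.getD k []).length)).sum) < fuel →
      (pvTraverseB rg fuel stack seen).Nodup ∧
      (∀ x, x ∈ pvTraverseB rg fuel stack seen ↔ Relation.TransGen (pvE rg) c x) := by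
  intro fuel
  induction fuel with
  | zero => intro stack seen _ _ _ _ _ _ hlen; omega
  | succ fuel ih =>
    intro stack seen h1 h2 h3 h4 h5 h6 hlen
    match stack with
    | [] =>
      simp only [pvTraverseB]
      refine ⟨h6, ?_⟩
      intro x
      constructor
      · exact h3 x
      · intro hx
        refine pv_closed rg seen c ?_ ?_ x hx
        · intro d hd; rcases h5 d hd with h | h; exact h; simp at h
        · intro v hv d hd; rcases h4 v hv d hd with h | h; exact h; simp at h
    | n :: stack =>
      by_cases hns : n ∈ seen
      · simp only [pvTraverseB, if_pos hns]
        refine ih stack seen (fun m hm => h1 m (List.mem_cons_of_mem _ hm))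
          (fun m hm => h2 m (List.mem_cons_of_mem _ hm)) h3 ?_ ?_ h6 (by simp only [List.length_cons] at hlen; omega)
        · intro v hv d hd
          rcases h4 v hv d hd with h | h
          · exact Or.inl h
          · rcases List.mem_cons.mp h with rfl | h
            · exact Or.inl hns
            · exact Or.inr h
        · intro d hd
          rcases h5 d hd with h | h
          · exact Or.inl h
          · rcases List.mem_cons.mp h with rfl | h
            · exact Or.inl hns
            · exact Or.inr h
      · simp only [pvTraverseB, if_neg hns]
        have hadd : PySem.Set.add seen n = seen ++ [n] := PySem.Set.add_of_not_mem hns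
        have hmemadd : ∀ x, x ∈ PySem.Set.add seen n ↔ x ∈ seen ∨ x = n := fun x => PySem.Set.mem_add seen n x
        have hnU : n ∈ U := h2 n (List.mem_cons_self)
        have hnT : Relation.TransGen (pvE rg) c n := h1 n (List.mem_cons_self)
        have hsum := pv_sum_filter (fun k => (rg.getD k []).length) n seen hns U hU hnU
        refine ih ((rg.getD n []).reverse ++ stack) (PySem.Set.add seen n) ?_ ?_ ?_ ?_ ?_
          (PySem.Set.nodup_add seen n h6) ?_
        · intro m hm
          rcases List.mem_append.mp hm with hm | hm
          · exact Relation.TransGen.tail hnT (List.mem_reverse.mp hm)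
          · exact h1 m (List.mem_cons_of_mem _ hm)
        · intro m hm
          rcases List.mem_append.mp hm with hm | hm
          · exact hg n m (List.mem_reverse.mp hm)
          · exact h2 m (List.mem_cons_of_mem _ hm)
        · intro v hv
          rcases (hmemadd v).mp hv with hv | rfl
          · exact h3 v hv
          · exact hnT
        · intro v hv d hd
          rcases (hmemadd v).mp hv with hv | rfl
          · rcases h4 v hv d hd with h | h
            · exact Or.inl ((hmemadd d).mpr (Or.inl h))
            · rcases List.mem_cons.mp h with rfl | h
              · exact Or.inl ((hmemadd d).mpr (Or.inr rfl))
              · exact Or.inr (List.mem_append.mpr (Or.inr h))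
          · exact Or.inr (List.mem_append.mpr (Or.inl (List.mem_reverse.mpr hd)))
        · intro d hd
          rcases h5 d hd with h | h
          · exact Or.inl ((hmemadd d).mpr (Or.inl h))
          · rcases List.mem_cons.mp h with rfl | h
            · exact Or.inl ((hmemadd d).mpr (Or.inr rfl))
            · exact Or.inr (List.mem_append.mpr (Or.inr h))
        · rw [hadd]
          simp only [List.length_append, List.length_reverse, List.length_cons] at hlen ⊢
          beta_reduce at hsum
          omega


theorem pv_len_eq {l₁ l₂ : List String} (h₁ : l₁.Nodup) (h₂ : l₂.Nodup)
    (h : ∀ x, x ∈ l₁ ↔ x ∈ l₂) : l₁.length = l₂.length := by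
  rw [← List.toFinset_card_of_nodup h₁, ← List.toFinset_card_of_nodup h₂]
  congr 1
  ext x
  simp [h x]

-- the two reverse-graph constructions are definitionally the same dictionary
theorem pvRevGraph_eq (items : List (String × List String)) :
    pvRevGraphA items = pvRevGraphB items := rfl

-- ===== VERDICT (by name: the statement is the Claim_ definition above) =====
theorem calculate_dependents_spec : Claim_equal_calculate_dependents := by
  intro components _
  unfold Spec_calculate_dependents
  simp only [calculate_dependents, calculate_dependents_alt, ← pvRevGraph_eq]
  set comps := PySem.Dict.ofList components with hcomps
  set rg := pvRevGraphA comps.items with hrg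
  have hU : comps.keys.Nodup := PySem.Dict.nodup_keys_ofList components
  have hkeys : ∀ p ∈ comps.items, p.1 ∈ comps.keys := by
    intro p hp
    simp only [PySem.Dict.keys]
    exact List.mem_map_of_mem hp
  have hg : ∀ x, ∀ d ∈ rg.getD x [], d ∈ comps.keys :=
    pvRevGraphA_values comps.items (fun v => v ∈ comps.keys) hkeys
  have hlenU : comps.keys.length = comps.items.length := by
    simp [PySem.Dict.keys]
  have hcount : ∀ p ∈ comps.items,
      ((pvDfsA rg (comps.items.length + 1) p.1 PySem.Set.empty).1.length : Int)
        = ((pvTraverseB rg ((rg.getD p.1 []).reverse.length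
              + (comps.keys.map (fun k => (rg.getD k []).length)).sum + 1)
            ((rg.getD p.1 []).reverse) PySem.Set.empty).length : Int) := by
    intro p hp
    have hc : p.1 ∈ comps.keys := hkeys p hp
    obtain ⟨hAnd, hAmem⟩ := pvDfsA_root rg comps.keys hg p.1 hc
      (comps.items.length + 1) (by omega)
    have hfilter : comps.keys.filter (fun x => decide (x ∉ (PySem.Set.empty : PySem.Set String)))
        = comps.keys := by
      apply List.filter_eq_self.mpr
      intro x _
      simp [PySem.Set.empty]
    obtain ⟨hBnd, hBmem⟩ := pvTraverseB_spec rg comps.keys hg hU p.1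
      ((rg.getD p.1 []).reverse.length
          + (comps.keys.map (fun k => (rg.getD k []).length)).sum + 1)
      ((rg.getD p.1 []).reverse) PySem.Set.empty
      (fun n hn => Relation.TransGen.single (List.mem_reverse.mp hn))
      (fun n hn => hg p.1 n (List.mem_reverse.mp hn))
      (by intro v hv; simp [PySem.Set.empty] at hv)
      (by intro v hv; simp [PySem.Set.empty] at hv)
      (fun d hd => Or.inr (List.mem_reverse.mpr hd))
      List.nodup_nil
      (by rw [hfilter]; omega)
    have hlen : (pvDfsA rg (comps.items.length + 1) p.1 PySem.Set.empty).1.length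
        = (pvTraverseB rg ((rg.getD p.1 []).reverse.length
              + (comps.keys.map (fun k => (rg.getD k []).length)).sum + 1)
            ((rg.getD p.1 []).reverse) PySem.Set.empty).length := by
      apply pv_len_eq hAnd hBnd
      intro x
      rw [hAmem x, hBmem x]
    rw [hlen]
  apply congrArg PySem.Dict.items
  apply PySem.List.foldl_congr_mem
  intro acc p hp
  rw [hcount p hp]
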